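-- pv_equiv track=rewrite | github.com/Jan-Dro/Coding-Challenges | subDomain.py | subDomain
-- ===== SOURCE A (Python) =====
-- def subDomain(s):
--     for word in s:
--         newString = word.split(' ')
--     number = newString[0]
--     newString.pop(0)
--     domain = '.'.join(newString)
--     subdomains = domain.split('.')
--
--     answer = []
--     for i in range(len(subdomains)):
--         subdomain = '.'.join(subdomains[i:])
--         answer.append(number + ' ' + subdomain)
--
--     return answer
-- ===== SOURCE B (Python) =====
-- def subDomain(s):
--     # Only the last element of s matters (A overwrites newString each iteration).
--     tokens = s[-1].split(' ')
--     number = tokens[0]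
--     parts = '.'.join(tokens[1:]).split('.')
--     out = []
--     suffix = None
--     for p in reversed(parts):
--         suffix = p if suffix is None else p + '.' + suffix
--         out.append(number + ' ' + suffix)
--     out.reverse()
--     return out
-- ===== Notes on version B (the rewrite author's own statement) =====
-- stated objective: faster
-- what changed: B uses only the last element (A's loop overwrites its split each iteration) and builds the suffix joins incrementally in one right-to-left pass instead of re-joining a slice for every index.
import Mathlib
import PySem

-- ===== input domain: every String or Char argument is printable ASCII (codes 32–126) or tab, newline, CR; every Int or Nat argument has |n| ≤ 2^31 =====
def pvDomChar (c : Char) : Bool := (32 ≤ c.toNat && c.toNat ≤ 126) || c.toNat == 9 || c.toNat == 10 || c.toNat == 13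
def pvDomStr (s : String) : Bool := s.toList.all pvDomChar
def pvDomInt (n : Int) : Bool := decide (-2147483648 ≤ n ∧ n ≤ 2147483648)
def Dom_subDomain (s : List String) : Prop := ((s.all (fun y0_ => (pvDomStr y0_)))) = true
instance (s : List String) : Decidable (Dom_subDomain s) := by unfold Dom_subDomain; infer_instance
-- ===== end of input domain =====

-- B reads only the last element (A's loop overwrites its split every iteration) and builds the
-- suffix joins incrementally in one right-to-left pass instead of re-joining a slice per index (faster).

-- ===== PORT A =====
def subDomain (s : List String) : List String :=
  -- 'for word in s: newString = word.split(' ')' — only the last assignment survives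
  match s.foldl (fun _ word => some ((PySem.Str.split? word " ").getD [])) (none : Option (List String)) with
  | none => []        -- loop never ran: Python raises NameError here (outside Pre_)
  | some ns =>
    match ns with
    | [] => []        -- unreachable: str.split(' ') never returns an empty list (totality guard)
    | number :: rest =>      -- number = newString[0]; newString.pop(0) leaves rest
      let domain := PySem.Str.join "." rest
      let subdomains := (PySem.Str.split? domain ".").getD []
      (PySem.List.pyRange 0 (subdomains.length : Int) 1).foldl
        (fun answer i =>
          answer ++ [number ++ " " ++ PySem.Str.join "." (PySem.List.slice subdomains (some i) none)]) []

-- ===== PORT B =====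
def subDomain_alt (s : List String) : List String :=
  match PySem.List.pyGet? s (-1) with
  | none => []        -- s = []: Python raises IndexError here (outside Pre_)
  | some last =>
    match (PySem.Str.split? last " ").getD [] with
    | [] => []        -- unreachable: str.split(' ') never returns an empty list (totality guard)
    | number :: rest =>
      let parts := (PySem.Str.split? (PySem.Str.join "." rest) ".").getD []
      let res := parts.reverse.foldl
        (fun (acc : List String × Option String) p =>
          let suf := match acc.2 with | none => p | some t => p ++ "." ++ t
          (acc.1 ++ [number ++ " " ++ suf], some suf)) ([], none)
      res.1.reverse

-- ===== PRECONDITION & SPEC =====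
-- A raises UnboundLocalError on the empty list (its loop body never runs); B raises IndexError there too.
def Pre_subDomain (s : List String) : Prop := s ≠ []
instance (s : List String) : Decidable (Pre_subDomain s) := by unfold Pre_subDomain; infer_instance
def pvWitness_subDomain : List String := (["9 discuss.leetcode.com"])
def Spec_subDomain (s : List String) (out : List String) : Prop := out = subDomain_alt s
instance (s : List String) (out : List String) : Decidable (Spec_subDomain s out) := by unfold Spec_subDomain; infer_instance

-- ===== CLAIM (what is proved, stated in full; the proofs are below) =====
def Claim_equal_subDomain : Prop := ∀ (s : List String), Dom_subDomain s → Pre_subDomain s → Spec_subDomain s (subDomain s)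

-- ===== LEMMAS AND PROOFS =====

-- Str-level join cons lemmas (derived from the Chars-level ones via toList)
theorem strJoin_singleton (sep p : String) : PySem.Str.join sep [p] = p := by
  apply String.toList_injective
  simp [PySem.Str.toList_join, PySem.Chars.join_singleton]

theorem strJoin_cons_cons (sep p q : String) (rest : List String) :
    PySem.Str.join sep (p :: q :: rest) = p ++ sep ++ PySem.Str.join sep (q :: rest) := by
  apply String.toList_injective
  simp [PySem.Str.toList_join, PySem.Chars.join_cons_cons]

-- A's "last assignment wins" loop is s[-1]
theorem foldl_last_assign {α β : Type} (f : α → β) (s : List α) :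
    s.foldl (fun _ w => some (f w)) (none : Option β) = (PySem.List.pyGet? s (-1)).map f := by
  induction s using List.reverseRecOn with
  | nil => rfl
  | append_singleton xs x _ =>
    rw [List.foldl_append]
    simp [PySem.List.pyGet?, PySem.List.pyIdx?]

-- the state of B's right-to-left fold over l.reverse
theorem bfold_state (number : String) (l : List String) :
    l.reverse.foldl
        (fun (acc : List String × Option String) p =>
          let suf := match acc.2 with | none => p | some t => p ++ "." ++ t
          (acc.1 ++ [number ++ " " ++ suf], some suf)) ([], none)
      = (((List.range l.length).map
            (fun k => number ++ " " ++ PySem.Str.join "." (l.drop k))).reverse,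
         if l = [] then none else some (PySem.Str.join "." l)) := by
  induction l with
  | nil => rfl
  | cons a l' ih =>
    rw [List.reverse_cons, List.foldl_append, ih]
    have hsuf : (match (if l' = [] then none else some (PySem.Str.join "." l')) with
          | none => a | some t => a ++ "." ++ t) = PySem.Str.join "." (a :: l') := by
      cases l' with
      | nil => simp [strJoin_singleton]
      | cons b l'' => simp [strJoin_cons_cons]
    simp only [List.foldl_cons, List.foldl_nil, hsuf]
    refine Prod.ext ?_ (by simp)
    simp only [List.length_cons, List.range_succ_eq_map, List.map_cons, List.map_map,
      List.reverse_cons, List.drop_zero]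
    rfl

-- A's range-indexed re-join loop produces the same list front-to-back
theorem foldl_append_map {α : Type} (g : α → String) (ks : List α) (acc : List String) :
    ks.foldl (fun answer k => answer ++ [g k]) acc = acc ++ ks.map g := by
  induction ks generalizing acc with
  | nil => simp
  | cons k ks ih => simp [ih]

theorem afold_range (number : String) (parts : List String) :
    (PySem.List.pyRange 0 (parts.length : Int) 1).foldl
        (fun answer i =>
          answer ++ [number ++ " " ++ PySem.Str.join "." (PySem.List.slice parts (some i) none)]) []
      = (List.range parts.length).map
          (fun k => number ++ " " ++ PySem.Str.join "." (parts.drop k)) := by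
  rw [PySem.List.pyRange_one]
  simp only [Int.sub_zero, Int.toNat_natCast, List.foldl_map]
  rw [foldl_append_map (fun k : Nat =>
    number ++ " " ++ PySem.Str.join "." (PySem.List.slice parts (some ((0 : Int) + k)) none))]
  simp only [List.nil_append]
  apply List.map_congr_left
  intro k _
  rw [show ((0 : Int) + k) = (k : Int) by omega,
    PySem.List.slice_from parts (by positivity)]
  simp

-- ===== VERDICT (by name: the statement is the Claim_ definition above) =====
theorem subDomain_spec : Claim_equal_subDomain := by
  intro s _ hpre
  unfold Spec_subDomain subDomain subDomain_alt
  rw [foldl_last_assign]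
  cases hlast : PySem.List.pyGet? s (-1) with
  | none =>
    exfalso
    cases s with
    | nil => exact hpre rfl
    | cons a s' => simp [PySem.List.pyGet?, PySem.List.pyIdx?] at hlast
  | some last =>
    simp only [Option.map_some]
    cases (PySem.Str.split? last " ").getD [] with
    | nil => rfl
    | cons number rest =>
      simp only [bfold_state, afold_range, List.reverse_reverse]
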